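-- pv_equiv track=rewrite | github.com/yujeong23/algorithm | programmers/level2/42578_위장.py | solution
-- ===== SOURCE A (Python) =====
-- def solution(clothes):
--     answer = 1
--     dict = {}
--     for value, key in clothes:
--         if key in dict:
--             dict[key] += 1
--         else:
--             dict[key] = 2
--
--     for num in dict.values():
--         answer *= num
--
--     return answer-1
-- ===== SOURCE B (Python) =====
-- def solution(clothes):
--     categories = {key for _, key in clothes}
--     answer = 1
--     for category in categories:
--         answer *= sum(1 for _, key in clothes if key == category) + 1
--     return answer - 1
-- ===== Notes on version B (the rewrite author's own statement) =====
-- stated objective: alternative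
-- what changed: B collects the distinct categories as a set and, for each one, counts its occurrences by a fresh scan of the list, multiplying (count+1) into the product, instead of A's single pass that maintains per-category counters in a dict and then multiplies the dict values.
import Mathlib
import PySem

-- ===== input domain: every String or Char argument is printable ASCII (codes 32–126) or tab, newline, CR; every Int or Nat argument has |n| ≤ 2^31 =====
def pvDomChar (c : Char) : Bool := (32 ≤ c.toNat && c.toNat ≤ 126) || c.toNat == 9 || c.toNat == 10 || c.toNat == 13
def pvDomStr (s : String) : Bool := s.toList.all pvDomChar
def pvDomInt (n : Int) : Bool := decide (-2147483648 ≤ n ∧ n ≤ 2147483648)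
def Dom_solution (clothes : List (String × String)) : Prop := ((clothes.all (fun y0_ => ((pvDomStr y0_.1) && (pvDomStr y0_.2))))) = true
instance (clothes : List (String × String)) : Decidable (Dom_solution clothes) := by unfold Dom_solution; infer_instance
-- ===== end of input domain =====

-- B replaces A's one-pass dict of counters by a distinct-category set with a counting
-- scan per category (alternative decomposition, not claimed faster).

-- ===== PORT A =====
def solution (clothes : List (String × String)) : Int :=
  -- answer = 1; dict = {}; for value, key in clothes: if key in dict: dict[key] += 1 else dict[key] = 2
  let d := clothes.foldl (fun d p =>
      if d.contains p.2 then d.insert p.2 (d.getD p.2 0 + 1) else d.insert p.2 2)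
    PySem.Dict.empty
  -- for num in dict.values(): answer *= num
  let answer := d.values.foldl (fun a n => a * n) (1 : Int)
  answer - 1

-- ===== PORT B =====
def solution_alt (clothes : List (String × String)) : Int :=
  -- categories = {key for _, key in clothes}
  let categories : PySem.Set String := PySem.Set.ofList (clothes.map Prod.snd)
  -- for category in categories: answer *= sum(1 for _, key in clothes if key == category) + 1
  -- (the product over the set does not depend on the set's iteration order)
  let answer := categories.foldl (fun a c =>
      a * (clothes.foldl (fun s p => if p.2 == c then s + 1 else s) (0 : Int) + 1)) (1 : Int)
  answer - 1

-- ===== PRECONDITION & SPEC =====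
def Spec_solution (clothes : List (String × String)) (out : Int) : Prop := out = solution_alt clothes
instance (clothes : List (String × String)) (out : Int) : Decidable (Spec_solution clothes out) := by unfold Spec_solution; infer_instance

-- ===== CLAIM (what is proved, stated in full; the proofs are below) =====
def Claim_equal_solution : Prop := ∀ (clothes : List (String × String)), Dom_solution clothes → Spec_solution clothes (solution clothes)

-- ===== LEMMAS AND PROOFS =====

-- A's dict is the Counter of the categories with every value shifted by +1.
def shiftD (d : PySem.Dict String Int) : PySem.Dict String Int :=
  PySem.Dict.mk (d.items.map (fun p => (p.1, p.2 + 1)))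

lemma step_shift (d : PySem.Dict String Int) (x : String × String) :
    (if (shiftD d).contains x.2 then (shiftD d).insert x.2 ((shiftD d).getD x.2 0 + 1)
     else (shiftD d).insert x.2 2)
    = shiftD (d.modify x.2 0 (· + 1)) := by
  have hc : (shiftD d).contains x.2 = d.contains x.2 := by
    simp [shiftD, PySem.Dict.contains, List.any_map, Function.comp_def]
  have hg : (shiftD d).get? x.2 = (d.get? x.2).map (· + 1) := by
    simp [shiftD, PySem.Dict.get?, List.find?_map, Function.comp_def]
  by_cases h : d.contains x.2 = true
  · obtain ⟨v, hv⟩ : ∃ v, d.get? x.2 = some v := by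
      rw [PySem.Dict.contains_eq_isSome_get?] at h
      exact Option.isSome_iff_exists.mp h
    have hcs : (shiftD d).contains x.2 = true := hc.trans h
    rw [if_pos hcs]
    have e1 : (shiftD d).getD x.2 0 = v + 1 := by simp [PySem.Dict.getD, hg, hv]
    rw [e1]
    simp only [PySem.Dict.modify, PySem.Dict.getD, hv, Option.getD_some]
    simp only [PySem.Dict.insert, hcs, h, if_pos]
    apply PySem.Dict.ext
    simp only [shiftD, List.map_map]
    apply List.map_congr_left
    intro p _
    by_cases hp : p.1 = x.2 <;> simp [hp]
  · have hcs : (shiftD d).contains x.2 = false := by rw [hc]; simpa using h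
    rw [if_neg (by simp [hcs])]
    have hgn : d.get? x.2 = none := by
      rw [PySem.Dict.contains_eq_isSome_get?] at h
      simpa using h
    simp only [PySem.Dict.modify, PySem.Dict.getD, hgn, Option.getD_none]
    simp only [PySem.Dict.insert, hcs, h, if_neg, Bool.false_eq_true, not_false_iff]
    apply PySem.Dict.ext
    simp [shiftD]

lemma foldl_shift (ps : List (String × String)) (d : PySem.Dict String Int) :
    ps.foldl (fun d p =>
      if d.contains p.2 then d.insert p.2 (d.getD p.2 0 + 1) else d.insert p.2 2) (shiftD d)
    = shiftD (ps.foldl (fun d p => d.modify p.2 0 (· + 1)) d) := by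
  induction ps generalizing d with
  | nil => rfl
  | cons x xs ih => simp only [List.foldl_cons, step_shift, ih]

lemma values_shiftD (d : PySem.Dict String Int) :
    (shiftD d).values = d.values.map (· + 1) := by
  simp [shiftD, PySem.Dict.values, List.map_map, Function.comp_def]

lemma dict_values (clothes : List (String × String)) :
    (clothes.foldl (fun d p =>
        if d.contains p.2 then d.insert p.2 (d.getD p.2 0 + 1) else d.insert p.2 2)
      PySem.Dict.empty).values
    = (PySem.Set.ofList (clothes.map Prod.snd)).map
        (fun k => ((clothes.map Prod.snd).count k : Int) + 1) := by
  have h0 : (PySem.Dict.empty : PySem.Dict String Int) = shiftD PySem.Dict.empty := rfl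
  rw [h0, foldl_shift, values_shiftD]
  have hcnt : clothes.foldl (fun d p => d.modify p.2 0 (· + 1)) PySem.Dict.empty
      = PySem.Dict.counter (clothes.map Prod.snd) := by
    rw [PySem.Dict.counter_eq_foldl, List.foldl_map]
  rw [hcnt]
  have : (PySem.Dict.counter (clothes.map Prod.snd)).values
      = (PySem.Set.ofList (clothes.map Prod.snd)).map
          (fun k => ((clothes.map Prod.snd).count k : Int)) := by
    simp only [PySem.Dict.values, PySem.Dict.items_counter, List.map_map, Function.comp_def]
  rw [this, List.map_map, Function.comp_def]

lemma inner_count (clothes : List (String × String)) (c : String) :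
    clothes.foldl (fun s p => if p.2 == c then s + 1 else s) (0 : Int)
    = ((clothes.map Prod.snd).count c : Int) := by
  rw [PySem.List.foldl_count_if]
  simp [List.count, List.countP_map, Function.comp_def]

-- ===== VERDICT (by name: the statement is the Claim_ definition above) =====
theorem solution_spec : Claim_equal_solution := by
  intro clothes _
  unfold Spec_solution solution solution_alt
  dsimp only
  rw [dict_values, List.foldl_map]
  congr 1
  apply PySem.List.foldl_congr_mem
  intro a c _
  rw [inner_count]
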